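-- pv_equiv track=rewrite | github.com/vinliang888/springboard-exercises | 18.2-python-ds-practice/38_min_max_key_in_dictionary/min_max_key_in_dictionary.py | min_max_keys
-- ===== SOURCE A (Python) =====
-- def min_max_keys(d):
--     """Return tuple (min-keys, max-keys) in d.
--
--         >>> min_max_keys({2: 'a', 7: 'b', 1: 'c', 10: 'd', 4: 'e'})
--         (1, 10)
--
--     Works with any kind of key that can be compared, like strings:
--
--         >>> min_max_keys({"apple": "red", "cherry": "red", "berry": "blue"})
--         ('apple', 'cherry')
--     """
--     min_key = None
--     max_key = None
--     for key in d.keys():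
--         if min_key == None:
--             min_key = key
--         if max_key == None:
--             max_key = key
--         if key > max_key:
--             max_key = key
--         if key < min_key:
--             min_key = key
--     return (min_key, max_key)
-- ===== SOURCE B (Python) =====
-- def min_max_keys(d):
--     if not d:
--         return (None, None)
--     keys = sorted(d)
--     return (keys[0], keys[-1])
-- ===== Notes on version B (the rewrite author's own statement) =====
-- stated objective: idiomatic
-- what changed: Replaced the manual simultaneous min/max comparison loop with an empty guard plus a single sort of the keys, returning the first and last sorted key.
-- outside the precondition, e.g. on min_max_keys({}): A returns (None, None), B returns (None, None)
import Mathlib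
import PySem

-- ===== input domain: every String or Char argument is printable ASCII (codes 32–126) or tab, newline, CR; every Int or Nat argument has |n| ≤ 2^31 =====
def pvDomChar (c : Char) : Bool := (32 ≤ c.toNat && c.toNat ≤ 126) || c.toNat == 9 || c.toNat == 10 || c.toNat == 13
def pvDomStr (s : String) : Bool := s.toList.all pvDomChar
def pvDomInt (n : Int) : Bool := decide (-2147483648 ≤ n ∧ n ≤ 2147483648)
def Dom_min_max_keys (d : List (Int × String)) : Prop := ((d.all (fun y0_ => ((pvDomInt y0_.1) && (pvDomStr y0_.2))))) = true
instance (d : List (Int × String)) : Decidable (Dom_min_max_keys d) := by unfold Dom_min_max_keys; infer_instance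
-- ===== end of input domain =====

-- B replaces A's manual simultaneous min/max scan with one sort of the keys, taking the ends (idiomatic).


-- ===== PORT A =====
-- literal port of A's loop: min_key/max_key start as None, updated by the four ifs in order
def min_max_keys_loop (st : Option Int × Option Int) (keys : List Int) : Option Int × Option Int :=
  match keys with
  | [] => st
  | key :: rest =>
      let mn := match st.1 with | none => some key | some m => some m
      let mx := match st.2 with | none => some key | some m => some m
      let mx := match mx with | none => none | some m => if key > m then some key else some m
      let mn := match mn with | none => none | some m => if key < m then some key else some m
      min_max_keys_loop (mn, mx) rest

def min_max_keys (d : List (Int × String)) : Int × Int :=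
  match min_max_keys_loop (none, none) (d.map Prod.fst) with
  | (some a, some b) => (a, b)
  | _ => (0, 0)   -- Python returns (None, None) here (empty dict); outside Pre_

-- ===== PORT B =====
def min_max_keys_alt (d : List (Int × String)) : Int × Int :=
  if d = [] then (0, 0)   -- Python returns (None, None) here; outside Pre_
  else
    let keys := PySem.List.sorted (d.map Prod.fst) (fun x => x) false
    ((PySem.List.pyGet? keys 0).getD 0, (PySem.List.pyGet? keys (-1)).getD 0)

-- ===== PRECONDITION & SPEC =====
-- Pre_ excludes only the empty dict, on which both Pythons return (None, None), not an Int pair.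
def Pre_min_max_keys (d : List (Int × String)) : Prop := d ≠ []
instance (d : List (Int × String)) : Decidable (Pre_min_max_keys d) := by unfold Pre_min_max_keys; infer_instance
def pvWitness_min_max_keys : (List (Int × String)) := [(2, "a"), (7, "b"), (1, "c")]

def Spec_min_max_keys (d : List (Int × String)) (out : Int × Int) : Prop := out = min_max_keys_alt d
instance (d : List (Int × String)) (out : Int × Int) : Decidable (Spec_min_max_keys d out) := by unfold Spec_min_max_keys; infer_instance

-- ===== CLAIM (what is proved, stated in full; the proofs are below) =====
def Claim_equal_min_max_keys : Prop := ∀ (d : List (Int × String)), Dom_min_max_keys d → Pre_min_max_keys d → Spec_min_max_keys d (min_max_keys d)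

-- ===== LEMMAS AND PROOFS =====

-- once both accumulators are set, A's loop is a running min / running max
theorem min_max_keys_loop_some (keys : List Int) (a b : Int) :
    min_max_keys_loop (some a, some b) keys = (some (keys.foldl min a), some (keys.foldl max b)) := by
  induction keys generalizing a b with
  | nil => simp [min_max_keys_loop]
  | cons k rest ih =>
      simp only [min_max_keys_loop, List.foldl_cons]
      have h1 : (if k < a then some k else some a) = some (min a k) := by
        split_ifs with h <;> simp <;> omega
      have h2 : (if k > b then some k else some b) = some (max b k) := by
        split_ifs with h <;> simp <;> omega
      rw [h1, h2, ih]

-- in a ≤-sorted list, the last element bounds every element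
theorem getLast_ge_of_pairwise (l : List Int) (hl : l ≠ []) (hp : l.Pairwise (· ≤ ·)) :
    ∀ y ∈ l, y ≤ l.getLast hl := by
  induction l with
  | nil => simp at hl
  | cons x t ih =>
      intro y hy
      rcases List.pairwise_cons.mp hp with ⟨hx, ht⟩
      cases t with
      | nil => simp at hy; simp [hy, List.getLast]
      | cons z t' =>
          have hne : (z :: t') ≠ [] := by simp
          rw [List.getLast_cons hne]
          rcases List.mem_cons.mp hy with hy | hy
          · exact hy ▸ le_trans (hx z (by simp)) (ih hne ht z (by simp))
          · exact ih hne ht y hy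

theorem min_max_keys_main (d : List (Int × String)) (hd : d ≠ []) :
    min_max_keys d = min_max_keys_alt d := by
  obtain ⟨p, d', rfl⟩ := List.exists_cons_of_ne_nil hd
  set k : Int := p.1 with hk
  set ks : List Int := d'.map Prod.fst with hks
  have hkeys : (p :: d').map Prod.fst = k :: ks := by simp [hk, hks]
  -- A's value
  have hA : min_max_keys (p :: d') = (List.foldl min k ks, List.foldl max k ks) := by
    simp only [min_max_keys, hkeys, min_max_keys_loop, lt_irrefl, if_false]
    rw [min_max_keys_loop_some]
  -- B's value
  set s : List Int := PySem.List.sorted (k :: ks) (fun x => x) false with hsdef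
  have hsne : s ≠ [] := by
    intro h
    have := (PySem.List.sorted_eq_nil_iff (xs := k :: ks) (key := fun x => x) (rev := false)).mp (hsdef ▸ h)
    simp at this
  obtain ⟨m, t, hs⟩ := List.exists_cons_of_ne_nil hsne
  have hsorted_eq : PySem.List.sorted (k :: ks) (fun x => x) false = m :: t := hsdef.symm.trans hs
  have hmem_s : ∀ x : Int, x ∈ s ↔ x ∈ k :: ks := by
    intro x; rw [hsdef]; exact PySem.List.mem_sorted _ _ _ _
  -- the running min is the sorted head
  have hfmin_mem : List.foldl min k ks ∈ k :: ks := by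
    rcases PySem.List.foldl_min_mem ks k with h | h
    · rw [h]; exact List.mem_cons_self
    · exact List.mem_cons_of_mem _ h
  have hmin : m = List.foldl min k ks := by
    apply le_antisymm
    · exact PySem.List.key_head_sorted_le _ _ hsorted_eq _ hfmin_mem
    · have hm : m ∈ k :: ks := (hmem_s m).mp (hs ▸ List.mem_cons_self)
      rcases List.mem_cons.mp hm with h | h
      · rw [h]; exact (PySem.List.foldl_min_le ks k).1
      · exact (PySem.List.foldl_min_le ks k).2 m h
  -- the running max is the sorted last element
  have hpw : s.Pairwise (· ≤ ·) := by
    have := PySem.List.sorted_pairwise (xs := k :: ks) (key := fun x : Int => x)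
    exact hsdef ▸ this
  have hfmax_mem : List.foldl max k ks ∈ s := by
    apply (hmem_s _).mpr
    rcases PySem.List.foldl_max_mem ks k with h | h
    · rw [h]; exact List.mem_cons_self
    · exact List.mem_cons_of_mem _ h
  have hmax : s.getLast hsne = List.foldl max k ks := by
    apply le_antisymm
    · have hlast : s.getLast hsne ∈ k :: ks := (hmem_s _).mp (List.getLast_mem hsne)
      rcases List.mem_cons.mp hlast with h | h
      · rw [h]; exact (PySem.List.le_foldl_max ks k).1
      · exact (PySem.List.le_foldl_max ks k).2 _ h
    · exact getLast_ge_of_pairwise s hsne hpw _ hfmax_mem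
  -- assemble B
  have hhead : PySem.List.pyGet? s 0 = some m := by
    rw [hs]; exact PySem.List.pyGet?_zero_cons m t
  have hB : min_max_keys_alt (p :: d') = (m, s.getLast hsne) := by
    unfold min_max_keys_alt
    rw [if_neg (List.cons_ne_nil p d')]
    simp only [hkeys, ← hsdef, hhead, PySem.List.pyGet?_neg_one,
      List.getLast?_eq_some_getLast hsne, Option.getD_some]
  rw [hA, hB, hmin, hmax]

-- ===== VERDICT (by name: the statement is the Claim_ definition above) =====
theorem min_max_keys_spec : Claim_equal_min_max_keys := by
  intro d _ hpre
  exact min_max_keys_main d hpre
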